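-- pv_equiv track=rewrite | github.com/fumbl3b/aoc2024 | src/day9/part2.py | identify_files
-- ===== SOURCE A (Python) =====
-- def identify_files(hard_drive):
--     files = {}  # Dictionary to store file_id: (start_index, end_index)
--     current_file_id = None
--     start_index = 0
--
--     for i, block in enumerate(hard_drive):
--         if block != '.':
--             if current_file_id is None:
--                 # Start of a new file
--                 current_file_id = block
--                 start_index = i
--             elif block != current_file_id:
--                 # Start of a different file; save the previous one
--                 files[current_file_id] = (start_index, i - 1)
--                 current_file_id = block
--                 start_index = i
--         else:
--             if current_file_id is not None:
--                 # End of the current file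
--                 files[current_file_id] = (start_index, i - 1)
--                 current_file_id = None
--
--     # Handle the last file if it ends at the end of the hard_drive
--     if current_file_id is not None:
--         files[current_file_id] = (start_index, len(hard_drive) - 1)
--
--     return files
-- ===== SOURCE B (Python) =====
-- def _runs(seq):
--     """Run-length decomposition: list of (value, length) for maximal equal runs."""
--     runs = []
--     i, n = 0, len(seq)
--     while i < n:
--         j = i + 1
--         while j < n and seq[j] == seq[i]:
--             j += 1
--         runs.append((seq[i], j - i))
--         i = j
--     return runs
--
--
-- def identify_files(hard_drive):
--     files = {}
--     start = 0
--     for value, length in _runs(hard_drive):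
--         if value != '.':
--             files[value] = (start, start + length - 1)
--         start += length
--     return files
-- ===== Notes on version B (the rewrite author's own statement) =====
-- stated objective: idiomatic
-- what changed: Replaces A's per-block state machine (current_file_id/start_index flags with deferred flushes at boundaries and after the loop) by a run-length decomposition of the drive followed by a single fold that records each non-dot run directly from a running start index.
import Mathlib
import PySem

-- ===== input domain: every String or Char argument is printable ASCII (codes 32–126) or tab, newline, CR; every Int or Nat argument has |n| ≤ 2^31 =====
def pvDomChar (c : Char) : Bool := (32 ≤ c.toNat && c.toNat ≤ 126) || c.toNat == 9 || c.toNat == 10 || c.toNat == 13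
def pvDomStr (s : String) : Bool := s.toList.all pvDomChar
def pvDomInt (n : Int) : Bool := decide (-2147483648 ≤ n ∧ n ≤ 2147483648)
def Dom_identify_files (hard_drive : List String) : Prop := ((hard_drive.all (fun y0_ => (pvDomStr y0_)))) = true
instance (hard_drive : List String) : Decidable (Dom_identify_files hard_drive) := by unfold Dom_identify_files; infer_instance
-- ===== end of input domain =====

-- B replaces A's per-block flag state machine by a run-length decomposition consumed by
-- a single accumulating fold (objective: simpler decomposition, same O(n) cost).

-- ===== PORT A =====
-- loop body of A's 'for i, block in enumerate(hard_drive)': state = (files, current_file_id, start_index)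
def aStep (st : PySem.Dict String (Int × Int) × Option String × Int) (i : Int) (block : String) :
    PySem.Dict String (Int × Int) × Option String × Int :=
  if block ≠ "." then
    match st.2.1 with
    | none => (st.1, some block, i)
    | some c => if block ≠ c then (st.1.insert c (st.2.2, i - 1), some block, i) else st
  else
    match st.2.1 with
    | some c => (st.1.insert c (st.2.2, i - 1), none, st.2.2)
    | none => st

-- the for loop itself, as structural recursion carrying the enumerate index
def aGo : List String → Int → PySem.Dict String (Int × Int) × Option String × Int →
    PySem.Dict String (Int × Int) × Option String × Int
  | [], _, st => st
  | b :: rest, i, st => aGo rest (i + 1) (aStep st i b)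

def identify_files (hard_drive : List String) : List (String × Int × Int) :=
  let st := aGo hard_drive 0 (PySem.Dict.empty, none, 0)
  (match st.2.1 with
   | some c => st.1.insert c (st.2.2, (hard_drive.length : Int) - 1)
   | none => st.1).items

-- ===== PORT B =====
-- Source B's _runs: maximal runs of equal values with their lengths (inner while = takeWhile)
def runsB : List String → List (String × Nat)
  | [] => []
  | x :: xs =>
      (x, 1 + (xs.takeWhile (fun b => b == x)).length) :: runsB (xs.dropWhile (fun b => b == x))
  termination_by l => l.length
  decreasing_by
    exact Nat.lt_succ_of_le (List.length_dropWhile_le _ _)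

def identify_files_alt (hard_drive : List String) : List (String × Int × Int) :=
  ((runsB hard_drive).foldl
      (fun (st : PySem.Dict String (Int × Int) × Int) r =>
        if r.1 ≠ "." then (st.1.insert r.1 (st.2, st.2 + (r.2 : Int) - 1), st.2 + (r.2 : Int))
        else (st.1, st.2 + (r.2 : Int)))
      (PySem.Dict.empty, 0)).1.items

-- ===== PRECONDITION & SPEC =====
def Spec_identify_files (hard_drive : List String) (out : List (String × Int × Int)) : Prop := out = identify_files_alt hard_drive
instance (hard_drive : List String) (out : List (String × Int × Int)) : Decidable (Spec_identify_files hard_drive out) := by unfold Spec_identify_files; infer_instance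

-- ===== CLAIM (what is proved, stated in full; the proofs are below) =====
def Claim_equal_identify_files : Prop := ∀ (hard_drive : List String), Dom_identify_files hard_drive → Spec_identify_files hard_drive (identify_files hard_drive)

-- ===== LEMMAS AND PROOFS =====

-- A's trailing 'if current_file_id is not None' flush, parametrised by the total length L
def aFin (st : PySem.Dict String (Int × Int) × Option String × Int) (L : Int) :
    PySem.Dict String (Int × Int) :=
  match st.2.1 with
  | some c => st.1.insert c (st.2.2, L - 1)
  | none => st.1

def bStep (st : PySem.Dict String (Int × Int) × Int) (r : String × Nat) :
    PySem.Dict String (Int × Int) × Int :=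
  if r.1 ≠ "." then (st.1.insert r.1 (st.2, st.2 + (r.2 : Int) - 1), st.2 + (r.2 : Int))
  else (st.1, st.2 + (r.2 : Int))

-- a run of dots leaves a cleared state untouched
lemma aGo_dots (t : List String) (d : List String) (j : Int) files s0
    (h : ∀ b ∈ t, b = ".") :
    aGo (t ++ d) j (files, none, s0) = aGo d (j + t.length) (files, none, s0) := by
  induction t generalizing j with
  | nil => simp
  | cons b t ih =>
      have hb : b = "." := h b (by simp)
      simp only [List.cons_append, aGo]
      rw [show aStep (files, none, s0) j b = (files, none, s0) by simp [aStep, hb]]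
      rw [ih (j + 1) (fun b hb => h b (by simp [hb]))]
      congr 1
      push_cast [List.length_cons]
      ring

-- a run of the current file id leaves the open-file state untouched
lemma aGo_same (x : String) (t : List String) (d : List String) (j : Int) files (i : Int)
    (h : ∀ b ∈ t, b = x) (hx : x ≠ ".") :
    aGo (t ++ d) j (files, some x, i) = aGo d (j + t.length) (files, some x, i) := by
  induction t generalizing j with
  | nil => simp
  | cons b t ih =>
      have hb : b = x := h b (by simp)
      simp only [List.cons_append, aGo]
      rw [show aStep (files, some x, i) j b = (files, some x, i) by simp [aStep, hb, hx]]
      rw [ih (j + 1) (fun b hb => h b (by simp [hb]))]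
      congr 1
      push_cast [List.length_cons]
      ring

-- closing the open file now or at the next differing block gives the same flushed dict
lemma aFin_reset (d : List String) (j : Int) files (x : String) (i : Int)
    (hd : ∀ y, d.head? = some y → y ≠ x) :
    aFin (aGo d j (files, some x, i)) (j + d.length)
      = aFin (aGo d j (files.insert x (i, j - 1), none, i)) (j + d.length) := by
  cases d with
  | nil => simp [aGo, aFin]
  | cons y rest =>
      have hyx : y ≠ x := hd y rfl
      by_cases hdot : y = "."
      · simp only [aGo, aStep, hdot]
        simp
      · simp only [aGo, aStep, ite_not, if_neg hdot, if_neg hyx]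

lemma head?_dropWhile_ne (x : String) :
    ∀ (l : List String) y, (l.dropWhile (fun b => b == x)).head? = some y → y ≠ x := by
  intro l
  induction l with
  | nil => intro y h; simp [List.dropWhile] at h
  | cons a l ih =>
      intro y h
      by_cases hax : a = x
      · rw [List.dropWhile_cons_of_pos (by simp [hax])] at h
        exact ih y h
      · rw [List.dropWhile_cons_of_neg (by simp [hax])] at h
        simp at h
        subst h; exact hax

-- main invariant: from a cleared state, A's flushed result equals B's fold over the runs
lemma main_inv : ∀ (n : Nat) (xs : List String), xs.length ≤ n → ∀ (j : Int) files (s0 : Int),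
    aFin (aGo xs j (files, none, s0)) (j + xs.length)
      = ((runsB xs).foldl bStep (files, j)).1 := by
  intro n
  induction n with
  | zero =>
      intro xs hlen j files s0
      have : xs = [] := List.length_eq_zero_iff.mp (Nat.le_zero.mp hlen)
      subst this
      simp [aGo, runsB, aFin]
  | succ n ih =>
      intro xs hlen j files s0
      cases xs with
      | nil => simp [aGo, runsB, aFin]
      | cons x rest =>
          set t := rest.takeWhile (fun b => b == x) with ht
          set d := rest.dropWhile (fun b => b == x) with hdd
          have hrest : t ++ d = rest := List.takeWhile_append_dropWhile
          have hdlen : d.length ≤ n := by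
            have h1 : d.length ≤ rest.length := List.length_dropWhile_le _ _
            have h2 : rest.length ≤ n := by simpa using Nat.succ_le_succ_iff.mp hlen
            omega
          have hlensum : t.length + d.length = rest.length := by
            rw [← hrest]; simp
          have hrunseq : runsB (x :: rest) = (x, 1 + t.length) :: runsB d := by
            rw [runsB]
          by_cases hx : x = "."
          · -- leading dot run
            have hstep : aGo (x :: rest) j (files, none, s0)
                = aGo d (j + 1 + t.length) (files, none, s0) := by
              subst hx
              simp only [aGo]
              rw [show aStep (files, none, s0) j "." = (files, none, s0) by simp [aStep]]
              rw [← hrest]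
              exact aGo_dots t d (j + 1) files s0
                (fun b hb => by simpa using List.mem_takeWhile_imp hb)
            have hlen3 : (x :: rest).length = 1 + t.length + d.length := by
              rw [← hrest]; simp; omega
            have hL : j + (((x :: rest).length : Nat) : Int)
                = (j + ((1 + t.length : Nat) : Int)) + (d.length : Int) := by
              rw [hlen3]; push_cast; ring
            rw [hstep, show j + 1 + (t.length : Int) = j + ((1 + t.length : Nat) : Int)
                  by push_cast; ring, hL, ih d hdlen _ files s0, hrunseq]
            simp only [List.foldl_cons]
            rw [show bStep (files, j) (x, 1 + t.length) = (files, j + ((1 + t.length : Nat) : Int))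
                  by simp [bStep, hx]]
          · -- leading file run
            have hstep : aGo (x :: rest) j (files, none, s0)
                = aGo d (j + 1 + t.length) (files, some x, j) := by
              simp only [aGo]
              rw [show aStep (files, none, s0) j x = (files, some x, j) by simp [aStep, hx]]
              rw [← hrest]
              exact aGo_same x t d (j + 1) files j
                (fun b hb => by simpa using List.mem_takeWhile_imp hb) hx
            rw [hstep]
            have hL : j + (((x :: rest).length : Nat) : Int) = (j + 1 + t.length) + (d.length : Int) := by
              have : (x :: rest).length = 1 + t.length + d.length := by
                rw [← hrest]; simp; omega
              rw [this]; push_cast; ring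
            rw [hL]
            rw [aFin_reset d (j + 1 + t.length) files x j (head?_dropWhile_ne x rest)]
            rw [ih d hdlen (j + 1 + t.length) (files.insert x (j, j + 1 + t.length - 1)) j]
            rw [hrunseq]
            simp only [List.foldl_cons]
            rw [show bStep (files, j) (x, 1 + t.length)
                  = (files.insert x (j, j + ((1 + t.length : Nat) : Int) - 1), j + ((1 + t.length : Nat) : Int))
                  by simp [bStep, hx]]
            have hc : j + ((1 + t.length : Nat) : Int) = j + 1 + (t.length : Int) := by
              push_cast; ring
            rw [hc]

-- ===== VERDICT (by name: the statement is the Claim_ definition above) =====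
theorem identify_files_spec : Claim_equal_identify_files := by
  intro hd _
  show identify_files hd = identify_files_alt hd
  have h := main_inv hd.length hd le_rfl 0 PySem.Dict.empty 0
  simp only [zero_add] at h
  have e1 : identify_files hd
      = (aFin (aGo hd 0 (PySem.Dict.empty, none, 0)) (hd.length : Int)).items := rfl
  have e2 : identify_files_alt hd
      = ((runsB hd).foldl bStep (PySem.Dict.empty, 0)).1.items := rfl
  rw [e1, e2, h]
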